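-- pv_equiv track=rewrite | github.com/SenpaiSubhasis/Python | sorting/infytq2.py | infyTQ
-- ===== SOURCE A (Python) =====
-- def infyTQ(word):
--   special_char=["!","@","#","$","%","^","&","*"]
--   result = []
--   for x in word:
--     if x not in special_char:
--       result.append(x)
--   result.reverse()
--
--   for y in range(len(word)):
--     if word[y].isalpha()==False:
--       result.insert(y,word[y])
--
--   answer = ""
--   return(answer.join(result))
--
--   return answer
-- ===== SOURCE B (Python) =====
-- def infyTQ(word):
--     special = set("!@#$%^&*")
--     keep = [c for c in word if c not in special]
--     out = []
--     for c in word: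
--         if c.isalpha():
--             out.append(keep.pop())
--         else:
--             out.append(c)
--     keep.reverse()
--     return "".join(out + keep)
-- ===== Notes on version B (the rewrite author's own statement) =====
-- stated objective: faster
-- what changed: Replaces A's quadratic second pass (repeated list.insert of every non-alpha character, shifting the tail each time) with a single merge pass over the word that emits non-alpha characters in place and draws alpha positions from the end of the filtered list via O(1) pops, appending the leftover reversed.
import Mathlib
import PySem

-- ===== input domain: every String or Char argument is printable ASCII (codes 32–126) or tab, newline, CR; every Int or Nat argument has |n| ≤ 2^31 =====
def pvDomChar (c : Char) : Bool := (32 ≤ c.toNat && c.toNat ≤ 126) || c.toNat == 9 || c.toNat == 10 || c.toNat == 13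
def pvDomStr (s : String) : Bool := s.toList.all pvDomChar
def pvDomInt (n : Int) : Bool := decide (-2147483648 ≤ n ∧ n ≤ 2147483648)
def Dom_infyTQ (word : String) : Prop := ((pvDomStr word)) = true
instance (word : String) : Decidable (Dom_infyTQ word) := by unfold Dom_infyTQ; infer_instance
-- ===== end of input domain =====

-- B replaces A's quadratic reinsertion loop (repeated list.insert, shifting the tail each time)
-- by a single merge pass that consumes the kept characters from the end of the filtered list;
-- objective: faster (asymptotic, O(n^2) → O(n)), same return value.

-- ===== PORT A =====
def pvSpecial : List Char := ['!', '@', '#', '$', '%', '^', '&', '*']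

def infyTQ (word : String) : String :=
  let cs := word.toList
  -- for x in word: if x not in special_char: result.append(x)
  let result := cs.foldl (fun r x => if pvSpecial.contains x then r else r ++ [x]) []
  -- result.reverse()
  let result := result.reverse
  -- for y in range(len(word)): if word[y].isalpha()==False: result.insert(y, word[y])
  -- word[y] is always in range here, so pyGetD's default is never used;
  -- PySem.Chars.isalpha is exact for the 1-char string word[y].isalpha().
  let result := (PySem.List.pyRange 0 (cs.length : Int)).foldl
    (fun r y =>
      if PySem.Chars.isalpha (PySem.List.pyGetD cs y 'A') = false then
        PySem.List.insert r y (PySem.List.pyGetD cs y 'A')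
      else r)
    result
  String.mk result

-- ===== PORT B =====
def infyTQ_alt (word : String) : String :=
  let cs := word.toList
  -- keep = [c for c in word if c not in special]
  let keep := cs.filter (fun c => !pvSpecial.contains c)
  -- for c in word: if c.isalpha(): out.append(keep.pop()) else: out.append(c)
  -- keep.pop() never raises here (alphabetic chars are never special), so the
  -- `none` branch of pop? is unreachable.
  let s := cs.foldl
    (fun (s : List Char × List Char) c =>
      if PySem.Chars.isalpha c then
        match PySem.List.pop? s.2 with
        | some (v, rest) => (s.1 ++ [v], rest)
        | none => (s.1, s.2)
      else (s.1 ++ [c], s.2))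
    ([], keep)
  -- keep.reverse(); return "".join(out + keep)
  String.mk (s.1 ++ s.2.reverse)

-- ===== PRECONDITION & SPEC =====
def Spec_infyTQ (word : String) (out : String) : Prop := out = infyTQ_alt word
instance (word : String) (out : String) : Decidable (Spec_infyTQ word out) := by unfold Spec_infyTQ; infer_instance

-- ===== CLAIM (what is proved, stated in full; the proofs are below) =====
def Claim_equal_infyTQ : Prop := ∀ (word : String), Dom_infyTQ word → Spec_infyTQ word (infyTQ word)

-- ===== LEMMAS AND PROOFS =====

-- The common merge result: walk the remaining characters `suf`, emitting non-alpha
-- characters as-is and drawing alpha positions from the front of `rest`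
-- (= the reversed remaining kept characters); the leftover of `rest` is appended.
def pvMerge : List Char → List Char → List Char
  | [], rest => rest
  | c :: cs, rest =>
    if PySem.Chars.isalpha c then
      match rest with
      | r :: rv => r :: pvMerge cs rv
      | [] => pvMerge cs []
    else c :: pvMerge cs rest

lemma pvLoopA (suf : List Char) : ∀ (pre out rest : List Char),
    out.length = pre.length →
    List.countP PySem.Chars.isalpha suf ≤ rest.length →
    (PySem.List.pyRange (pre.length : Int) ((pre.length : Int) + suf.length)).foldl
      (fun r y =>
        if PySem.Chars.isalpha (PySem.List.pyGetD (pre ++ suf) y 'A') = false then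
          PySem.List.insert r y (PySem.List.pyGetD (pre ++ suf) y 'A')
        else r)
      (out ++ rest)
    = out ++ pvMerge suf rest := by
  induction suf with
  | nil =>
    intro pre out rest _ _
    simp [PySem.List.pyRange_one_eq_nil, pvMerge]
  | cons c suf ih =>
    intro pre out rest hlen hcnt
    have hlt : (pre.length : Int) < (pre.length : Int) + (c :: suf).length := by
      simp
    rw [PySem.List.pyRange_one_cons hlt]
    have hget : PySem.List.pyGetD (pre ++ c :: suf) (pre.length : Int) 'A' = c := by
      simp [PySem.List.pyGetD_natCast, List.getD_eq_getElem?_getD]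
    simp only [List.foldl_cons, hget]
    have hre : (pre.length : Int) + 1 = ((pre ++ [c]).length : Int) := by simp
    have hre2 : (pre.length : Int) + ((c :: suf).length : Int)
        = ((pre ++ [c]).length : Int) + (suf.length : Int) := by simp; omega
    have hassoc : pre ++ c :: suf = (pre ++ [c]) ++ suf := by simp
    by_cases hal : PySem.Chars.isalpha c
    · -- alpha: no insert; rest is nonempty, its head lands at this position
      rw [List.countP_cons_of_pos (pa := hal)] at hcnt
      obtain ⟨r, rv, rfl⟩ : ∃ r rv, rest = r :: rv := by
        cases rest with
        | nil => simp at hcnt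
        | cons r rv => exact ⟨r, rv, rfl⟩
      rw [if_neg (by simp [hal])]
      have : out ++ r :: rv = (out ++ [r]) ++ rv := by simp
      rw [this, hre2, hassoc]
      have := ih (pre ++ [c]) (out ++ [r]) rv (by simp [hlen])
        (by simp only [List.length_cons] at hcnt; omega)
      rw [hre, this]
      simp [pvMerge, hal]
    · -- non-alpha: insert c at position out.length, i.e. between out and rest
      rw [if_pos (by simpa using hal)]
      have hins : PySem.List.insert (out ++ rest) ((pre.length : Int)) c
          = out ++ c :: rest := by
        rw [← hlen, PySem.List.insert_natCast _ _ _ (by simp)]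
        simp
      rw [hins]
      have : out ++ c :: rest = (out ++ [c]) ++ rest := by simp
      rw [this, hre2, hassoc]
      have := ih (pre ++ [c]) (out ++ [c]) rest (by simp [hlen])
        (by rw [List.countP_cons_of_neg (pa := by simp [hal])] at hcnt; exact hcnt)
      rw [hre, this]
      simp [pvMerge, hal]

lemma pvLoopB (suf : List Char) : ∀ (out keep : List Char),
    List.countP PySem.Chars.isalpha suf ≤ keep.length →
    (suf.foldl
      (fun (s : List Char × List Char) c =>
        if PySem.Chars.isalpha c then
          match PySem.List.pop? s.2 with
          | some (v, rest) => (s.1 ++ [v], rest)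
          | none => (s.1, s.2)
        else (s.1 ++ [c], s.2))
      (out, keep)).1
    ++ (suf.foldl
      (fun (s : List Char × List Char) c =>
        if PySem.Chars.isalpha c then
          match PySem.List.pop? s.2 with
          | some (v, rest) => (s.1 ++ [v], rest)
          | none => (s.1, s.2)
        else (s.1 ++ [c], s.2))
      (out, keep)).2.reverse
    = out ++ pvMerge suf keep.reverse := by
  induction suf with
  | nil => intro out keep _; simp [pvMerge]
  | cons c suf ih =>
    intro out keep hcnt
    by_cases hal : PySem.Chars.isalpha c
    · rw [List.countP_cons_of_pos (pa := hal)] at hcnt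
      obtain ⟨ks, k, rfl⟩ : ∃ ks k, keep = ks ++ [k] := by
        rcases List.eq_nil_or_concat keep with h | ⟨ks, k, h⟩
        · subst h; simp at hcnt
        · exact ⟨ks, k, by simpa using h⟩
      simp only [List.foldl_cons, if_pos hal, PySem.List.pop?_last]
      rw [ih (out ++ [k]) ks (by simp only [List.length_append, List.length_cons, List.length_nil] at hcnt; omega)]
      simp [pvMerge, hal]
    · rw [List.countP_cons_of_neg (pa := by simp [hal])] at hcnt
      simp only [List.foldl_cons, if_neg hal]
      rw [ih (out ++ [c]) keep hcnt]
      simp [pvMerge, hal]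

-- every alphabetic character is kept (none of the eight special chars is alphabetic)
lemma pvAlpha_count (cs : List Char) :
    List.countP PySem.Chars.isalpha cs
      ≤ (cs.filter (fun c => !pvSpecial.contains c)).length := by
  rw [← List.countP_eq_length_filter]
  exact List.countP_mono_left (fun x _ h => by
    simp only [Bool.not_eq_true']
    by_contra hc
    simp only [Bool.not_eq_false] at hc
    have hx : x ∈ pvSpecial := by simpa using hc
    fin_cases hx <;> exact absurd h (by decide))

-- A's first loop builds exactly the filtered list
lemma pvFilter_loop (cs : List Char) :
    cs.foldl (fun r x => if pvSpecial.contains x then r else r ++ [x]) []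
      = cs.filter (fun c => !pvSpecial.contains c) := by
  have hthis := PySem.List.foldl_append_if (fun c => !pvSpecial.contains c) (id) cs []
  simp only [List.map_id, List.nil_append] at hthis
  have hfun : (fun (r : List Char) x => if pvSpecial.contains x = true then r else r ++ [x])
      = (fun acc x => if (!pvSpecial.contains x) = true then acc ++ [id x] else acc) := by
    funext r x
    rcases Bool.eq_false_or_eq_true (pvSpecial.contains x) with hx | hx <;> simp [hx]
  rw [hfun, hthis]

-- ===== VERDICT (by name: the statement is the Claim_ definition above) =====
theorem infyTQ_spec : Claim_equal_infyTQ := by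
  intro word _
  unfold Spec_infyTQ infyTQ infyTQ_alt
  simp only [pvFilter_loop]
  have hA := pvLoopA word.toList [] []
      ((word.toList.filter (fun c => !pvSpecial.contains c)).reverse)
      (by simp)
      (by simpa using pvAlpha_count word.toList)
  have hB := pvLoopB word.toList [] (word.toList.filter (fun c => !pvSpecial.contains c))
      (pvAlpha_count word.toList)
  simp only [List.nil_append, List.length_nil, Nat.cast_zero, Int.zero_add] at hA hB
  rw [hA, hB]
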